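-- pv_equiv track=rewrite | github.com/martincesnovar/racunalnistvo | Tomo/casovna-zahtevnost/najvecje_podvsote.py | intervali_najvecjih_vsot_kvadratna
-- ===== SOURCE A (Python) =====
-- def intervali_najvecjih_vsot_kvadratna(sez):
--     '''vrne množico parov indeksov'''
--     opt = 0
--     mnozica = set()
--     n = len(sez)
--     for i in range(n):
--         s = sez[i]
--         if s>=opt:
--             if s > opt:
--                 opt = s
--                 mnozica.clear()
--             mnozica.add((i,i+1))
--         for j in range(i + 1, n):
--             s = s + sez[j]
--             if s>=opt:
--                 if s > opt:
--                     opt = s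
--                     mnozica.clear()
--                 mnozica.add((i,j+1))
--     return mnozica
-- ===== SOURCE B (Python) =====
-- def intervali_najvecjih_vsot_kvadratna(sez):
--     '''vrne množico parov indeksov'''
--     n = len(sez)
--     pre = [0]
--     for x in sez:
--         pre.append(pre[-1] + x)
--     opt = 0
--     for a in range(n):
--         for b in range(a + 1, n + 1):
--             d = pre[b] - pre[a]
--             if d > opt:
--                 opt = d
--     return {(a, b) for a in range(n) for b in range(a + 1, n + 1) if pre[b] - pre[a] == opt}
-- ===== Notes on version B (the rewrite author's own statement) =====
-- stated objective: simpler
-- what changed: Replaces the single interleaved running-sum loop that mutates and clears a set on the fly with a prefix-sum table and two separate passes: one to find the maximum interval sum, one comprehension to collect all intervals achieving it.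
import Mathlib
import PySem

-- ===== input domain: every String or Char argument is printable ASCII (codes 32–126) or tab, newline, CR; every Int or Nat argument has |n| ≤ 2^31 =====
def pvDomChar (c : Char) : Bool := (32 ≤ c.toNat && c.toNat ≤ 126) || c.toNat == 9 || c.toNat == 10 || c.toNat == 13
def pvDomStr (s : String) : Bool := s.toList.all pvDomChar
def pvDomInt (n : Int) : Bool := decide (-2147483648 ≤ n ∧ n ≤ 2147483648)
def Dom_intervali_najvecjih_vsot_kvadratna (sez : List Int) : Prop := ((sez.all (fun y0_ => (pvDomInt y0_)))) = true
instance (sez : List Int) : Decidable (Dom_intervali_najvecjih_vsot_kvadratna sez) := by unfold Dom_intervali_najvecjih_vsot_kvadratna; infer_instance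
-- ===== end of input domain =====

-- B replaces A's single interleaved running-sum loop (mutating/clearing a set in flight) by a
-- prefix-sum table and two separate passes: find the maximum interval sum, then collect all
-- intervals achieving it (objective: simpler).

-- ===== PORT A =====
def intervali_najvecjih_vsot_kvadratna (sez : List Int) : List (Int × Int) :=
  let n : Int := sez.length
  ((PySem.List.pyRange 0 n 1).foldl (fun (st : Int × List (Int × Int)) i =>
    let s := PySem.List.pyGetD sez i 0
    let st1 :=
      if s ≥ st.1 then
        if s > st.1 then (s, PySem.Set.add PySem.Set.empty (i, i + 1))
        else (st.1, PySem.Set.add st.2 (i, i + 1))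
      else st
    ((PySem.List.pyRange (i + 1) n 1).foldl
      (fun (st2 : Int × (Int × List (Int × Int))) j =>
        let s2 := st2.1 + PySem.List.pyGetD sez j 0
        (s2,
          if s2 ≥ st2.2.1 then
            if s2 > st2.2.1 then (s2, PySem.Set.add PySem.Set.empty (i, j + 1))
            else (st2.2.1, PySem.Set.add st2.2.2 (i, j + 1))
          else st2.2))
      (s, st1)).2) ((0 : Int), PySem.Set.empty)).2

-- ===== PORT B =====
def intervali_najvecjih_vsot_kvadratna_alt (sez : List Int) : List (Int × Int) :=
  let n : Int := sez.length
  let pre := sez.foldl (fun pre x => pre ++ [PySem.List.pyGetD pre (-1) 0 + x]) [(0 : Int)]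
  let opt := (PySem.List.pyRange 0 n 1).foldl (fun opt a =>
      (PySem.List.pyRange (a + 1) (n + 1) 1).foldl (fun opt b =>
        let d := PySem.List.pyGetD pre b 0 - PySem.List.pyGetD pre a 0
        if d > opt then d else opt) opt) 0
  (PySem.List.pyRange 0 n 1).foldl (fun acc a =>
      (PySem.List.pyRange (a + 1) (n + 1) 1).foldl (fun acc b =>
        if PySem.List.pyGetD pre b 0 - PySem.List.pyGetD pre a 0 = opt
        then PySem.Set.add acc (a, b) else acc) acc) PySem.Set.empty

-- ===== PRECONDITION & SPEC =====
def Spec_intervali_najvecjih_vsot_kvadratna (sez : List Int) (out : List (Int × Int)) : Prop := out = intervali_najvecjih_vsot_kvadratna_alt sez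
instance (sez : List Int) (out : List (Int × Int)) : Decidable (Spec_intervali_najvecjih_vsot_kvadratna sez out) := by unfold Spec_intervali_najvecjih_vsot_kvadratna; infer_instance

-- ===== CLAIM (what is proved, stated in full; the proofs are below) =====
def Claim_equal_intervali_najvecjih_vsot_kvadratna : Prop := ∀ (sez : List Int), Dom_intervali_najvecjih_vsot_kvadratna sez → Spec_intervali_najvecjih_vsot_kvadratna sez (intervali_najvecjih_vsot_kvadratna sez)

-- ===== LEMMAS AND PROOFS =====

-- prefix sum of the first k elements
def pvPfx (sez : List Int) (k : Nat) : Int := (sez.take k).sum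

-- all intervals (a, b), row a in order b = a+1 .. n, paired with their sums
def pvRow (sez : List Int) (a : Nat) : List ((Int × Int) × Int) :=
  (List.range (sez.length - a)).map
    (fun t => (((a : Int), ((a + 1 + t : Nat) : Int)), pvPfx sez (a + 1 + t) - pvPfx sez a))

def pvL (sez : List Int) : List ((Int × Int) × Int) :=
  (List.range sez.length).flatMap (pvRow sez)

-- one step of A's clear-and-add loop
def pvStep (st : Int × List (Int × Int)) (x : (Int × Int) × Int) : Int × List (Int × Int) :=
  if x.2 ≥ st.1 then
    if x.2 > st.1 then (x.2, PySem.Set.add PySem.Set.empty x.1)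
    else (st.1, PySem.Set.add st.2 x.1)
  else st

-- one step of B's collecting loop (M = the final optimum)
def pvAddIf (M : Int) (acc : List (Int × Int)) (x : (Int × Int) × Int) : List (Int × Int) :=
  if x.2 = M then PySem.Set.add acc x.1 else acc

lemma pv_foldl_flatMap {α β γ : Type} (g : α → List β) (f : γ → β → γ) (l : List α) (init : γ) :
    (l.flatMap g).foldl f init = l.foldl (fun acc x => (g x).foldl f acc) init := by
  induction l generalizing init with
  | nil => rfl
  | cons x xs ih => simp [List.flatMap_cons, List.foldl_append, ih]

lemma pv_pyRangeNat (a b : Nat) :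
    PySem.List.pyRange (a : Int) (b : Int) 1 = (List.range (b - a)).map (fun t => ((a + t : Nat) : Int)) := by
  rw [PySem.List.pyRange_one]
  have : ((b:Int) - (a:Int)).toNat = b - a := by omega
  rw [this]
  apply List.map_congr_left
  intro t _
  push_cast
  ring

lemma pv_max_if (o d : Int) : (if d > o then d else o) = max o d := by
  by_cases h : d ≤ o
  · simp [h, not_lt.mpr h]
  · simp [not_le.mp h, le_of_lt (not_le.mp h)]

lemma pv_step_char (L : List ((Int × Int) × Int)) (o₀ M : Int) (m₀ : List (Int × Int))
    (hM : M = L.foldl (fun o x => max o x.2) o₀) :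
    L.foldl pvStep (o₀, m₀) = (M, L.foldl (pvAddIf M) (if o₀ = M then m₀ else [])) := by
  induction L generalizing o₀ m₀ with
  | nil => simp at hM; simp [hM]
  | cons x rest ih =>
    have hle : o₀ ≤ M ∧ x.2 ≤ M := by
      have h := (PySem.List.le_foldl_max_int rest (fun y => y.2) (max o₀ x.2))
      simp only [List.foldl_cons] at hM
      constructor
      · calc o₀ ≤ max o₀ x.2 := le_max_left _ _
          _ ≤ _ := hM ▸ h.1
      · calc x.2 ≤ max o₀ x.2 := le_max_right _ _
          _ ≤ _ := hM ▸ h.1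
    simp only [List.foldl_cons] at hM ⊢
    rcases lt_trichotomy x.2 o₀ with hlt | heq | hgt
    · rw [show pvStep (o₀, m₀) x = (o₀, m₀) by simp [pvStep, not_le.mpr hlt]]
      rw [ih o₀ m₀ (by rw [hM]; congr 1; omega)]
      congr 1
      rw [show pvAddIf M (if o₀ = M then m₀ else []) x = (if o₀ = M then m₀ else []) by
        simp [pvAddIf]; intro hx; omega]
    · rw [show pvStep (o₀, m₀) x = (o₀, PySem.Set.add m₀ x.1) by
        simp [pvStep, heq]]
      rw [ih o₀ (PySem.Set.add m₀ x.1) (by rw [hM]; congr 1; omega)]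
      congr 1
      by_cases ho : o₀ = M
      · simp [ho, pvAddIf, heq ▸ ho]
      · have hx : ¬ x.2 = M := by omega
        simp [ho, pvAddIf, hx]
    · rw [show pvStep (o₀, m₀) x = (x.2, PySem.Set.add PySem.Set.empty x.1) by
        simp [pvStep, le_of_lt hgt, hgt]]
      rw [ih x.2 (PySem.Set.add PySem.Set.empty x.1) (by rw [hM]; congr 1; omega)]
      congr 1
      have ho : ¬ (o₀ = M) := by omega
      simp only [ho, ite_false]
      by_cases hx : x.2 = M
      · simp [hx, pvAddIf]
      · simp [hx, pvAddIf]

lemma pv_pfx_succ (sez : List Int) (k : Nat) (hk : k < sez.length) :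
    pvPfx sez (k + 1) = pvPfx sez k + PySem.List.pyGetD sez (k : Int) 0 := by
  rw [PySem.List.pyGetD_natCast]
  unfold pvPfx
  rw [List.sum_take_succ _ _ hk]
  simp [List.getD_eq_getElem?_getD, List.getElem?_eq_getElem hk]

lemma pv_last (l : List Int) (y : Int) : PySem.List.pyGetD (l ++ [y]) (-1) 0 = y := by
  simp [PySem.List.pyGetD, PySem.List.pyGet?, PySem.List.pyIdx?]

lemma pv_pre_build (xs : List Int) (acc : List Int) (c : Int)
    (h : PySem.List.pyGetD acc (-1) 0 = c) :
    xs.foldl (fun pre x => pre ++ [PySem.List.pyGetD pre (-1) 0 + x]) acc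
      = acc ++ (List.range xs.length).map (fun k => c + pvPfx xs (k + 1)) := by
  induction xs generalizing acc c with
  | nil => simp
  | cons x xs ih =>
    simp only [List.foldl_cons, h]
    rw [ih (acc ++ [c + x]) (c + x) (pv_last acc (c+x))]
    rw [List.append_assoc]
    congr 1
    rw [List.length_cons, List.range_succ_eq_map]
    simp only [List.map_cons, List.map_map]
    · simp [pvPfx]
      intro a _
      ring

lemma pv_pre_eq (sez : List Int) :
    sez.foldl (fun pre x => pre ++ [PySem.List.pyGetD pre (-1) 0 + x]) [(0 : Int)]
      = (List.range (sez.length + 1)).map (pvPfx sez) := by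
  rw [pv_pre_build sez [0] 0 (by simp [PySem.List.pyGetD, PySem.List.pyGet?, PySem.List.pyIdx?])]
  rw [List.range_succ_eq_map]
  simp only [List.map_cons, List.map_map]
  · simp [pvPfx]

lemma pv_pre_get (sez : List Int) (k : Nat) (hk : k ≤ sez.length) :
    PySem.List.pyGetD ((List.range (sez.length + 1)).map (pvPfx sez)) (k : Int) 0 = pvPfx sez k := by
  rw [PySem.List.pyGetD_natCast]
  rw [PySem.List.getD_map_range]
  omega

lemma pv_innerA (sez : List Int) (i : Nat) (d : Nat) :
    ∀ (k : Nat) (c : Int) (st : Int × List (Int × Int)),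
    k + d = sez.length → c = pvPfx sez k - pvPfx sez i →
    ((List.range d).map (fun t => ((k + t : Nat) : Int))).foldl
      (fun (st2 : Int × (Int × List (Int × Int))) j =>
        let s2 := st2.1 + PySem.List.pyGetD sez j 0
        (s2,
          if s2 ≥ st2.2.1 then
            if s2 > st2.2.1 then (s2, PySem.Set.add PySem.Set.empty ((i : Int), j + 1))
            else (st2.2.1, PySem.Set.add st2.2.2 ((i : Int), j + 1))
          else st2.2))
      (c, st)
    = (pvPfx sez sez.length - pvPfx sez i,
       ((List.range d).map
         (fun t => (((i : Int), ((k + t + 1 : Nat) : Int)), pvPfx sez (k + t + 1) - pvPfx sez i))).foldl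
         pvStep st) := by
  induction d with
  | zero =>
    intro k c st hkd hc
    simp at hkd
    simp [hc, hkd]
  | succ d ih =>
    intro k c st hkd hc
    have hk : k < sez.length := by omega
    have hs2 : c + PySem.List.pyGetD sez (k : Int) 0 = pvPfx sez (k + 1) - pvPfx sez i := by
      rw [pv_pfx_succ sez k hk] at *; omega
    rw [List.range_succ_eq_map]
    simp only [List.map_cons, List.foldl_cons, List.map_map, Nat.add_zero]
    have hmap1 : (List.range d).map ((fun t => ((k + t : Nat) : Int)) ∘ Nat.succ)
        = (List.range d).map (fun t => (((k + 1) + t : Nat) : Int)) := by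
      apply List.map_congr_left
      intro t _
      simp only [Function.comp]
      push_cast
      ring
    have hmap2 : (List.range d).map
          ((fun t => (((i : Int), ((k + t + 1 : Nat) : Int)), pvPfx sez (k + t + 1) - pvPfx sez i)) ∘ Nat.succ)
        = (List.range d).map
          (fun t => (((i : Int), (((k + 1) + t + 1 : Nat) : Int)), pvPfx sez ((k + 1) + t + 1) - pvPfx sez i)) := by
      apply List.map_congr_left
      intro t _
      simp only [Function.comp, Nat.succ_eq_add_one]
      have : k + (t + 1) + 1 = k + 1 + t + 1 := by omega
      rw [this]
    rw [hmap1, hmap2]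
    rw [ih (k + 1) (c + PySem.List.pyGetD sez (k : Int) 0) _ (by omega) hs2]
    congr 1
    simp only [pvStep]
    push_cast
    rw [hs2]

lemma pv_A_eq (sez : List Int) :
    intervali_najvecjih_vsot_kvadratna sez = ((pvL sez).foldl pvStep ((0 : Int), [])).2 := by
  unfold intervali_najvecjih_vsot_kvadratna pvL
  dsimp only
  rw [pv_foldl_flatMap]
  rw [show PySem.List.pyRange 0 (sez.length : Int) 1 = (List.range sez.length).map (fun t => ((t : Nat) : Int)) by
    have := pv_pyRangeNat 0 sez.length
    simpa using this]
  rw [List.foldl_map]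
  congr 1
  apply PySem.List.foldl_congr_mem
  intro st i hi
  have hi' : i < sez.length := List.mem_range.mp hi
  -- the row for i: head (i, i+1) then the inner loop
  have hrow : pvRow sez i
      = (((i : Int), ((i + 1 : Nat) : Int)), pvPfx sez (i + 1) - pvPfx sez i)
        :: (List.range (sez.length - (i + 1))).map
             (fun t => (((i : Int), (((i + 1) + t + 1 : Nat) : Int)), pvPfx sez ((i + 1) + t + 1) - pvPfx sez i)) := by
    unfold pvRow
    have : sez.length - i = (sez.length - (i + 1)) + 1 := by omega
    rw [this, List.range_succ_eq_map]
    simp only [List.map_cons, List.map_map, Nat.add_zero]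
    rfl
  rw [hrow, List.foldl_cons]
  have hcast : ((i : Int) + 1) = ((i + 1 : Nat) : Int) := by push_cast; ring
  rw [hcast, pv_pyRangeNat (i + 1) sez.length]
  rw [pv_innerA sez i (sez.length - (i + 1)) (i + 1)
       (PySem.List.pyGetD sez (i : Int) 0)
       _ (by omega) (by rw [pv_pfx_succ sez i hi']; ring)]
  simp only [pvStep]
  rw [pv_pfx_succ sez i hi']
  push_cast
  ring_nf

lemma pv_outer_shape {γ : Type} (sez : List Int) (F : γ → ((Int × Int) × Int) → γ)
    (G : γ → Int → Int → γ)
    (hG : ∀ (a : Nat) (acc : γ) (b : Int), G acc (a : Int) b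
        = F acc (((a : Int), b),
            PySem.List.pyGetD ((List.range (sez.length + 1)).map (pvPfx sez)) b 0
              - PySem.List.pyGetD ((List.range (sez.length + 1)).map (pvPfx sez)) ((a : Int)) 0))
    (init : γ) :
    (PySem.List.pyRange 0 (sez.length : Int) 1).foldl
      (fun acc a =>
        (PySem.List.pyRange (a + 1) ((sez.length : Int) + 1) 1).foldl (fun acc b => G acc a b) acc) init
    = (pvL sez).foldl F init := by
  unfold pvL
  rw [pv_foldl_flatMap]
  rw [show PySem.List.pyRange 0 (sez.length : Int) 1 = (List.range sez.length).map (fun t => ((t : Nat) : Int)) by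
    have := pv_pyRangeNat 0 sez.length
    simpa using this]
  rw [List.foldl_map]
  apply PySem.List.foldl_congr_mem
  intro acc a ha
  have ha' : a < sez.length := List.mem_range.mp ha
  rw [show ((a : Int) + 1) = ((a + 1 : Nat) : Int) by push_cast; ring,
      show ((sez.length : Int) + 1) = ((sez.length + 1 : Nat) : Int) by push_cast; ring,
      pv_pyRangeNat (a + 1) (sez.length + 1),
      show sez.length + 1 - (a + 1) = sez.length - a by omega]
  unfold pvRow
  rw [List.foldl_map, List.foldl_map]
  apply PySem.List.foldl_congr_mem
  intro acc t ht
  have ht' : t < sez.length - a := List.mem_range.mp ht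
  rw [hG a acc ((a + 1 + t : Nat) : Int)]
  rw [pv_pre_get sez (a + 1 + t) (by omega), pv_pre_get sez a (by omega)]

lemma pv_B_opt (sez : List Int) :
    (PySem.List.pyRange 0 (sez.length : Int) 1).foldl
      (fun opt a =>
        (PySem.List.pyRange (a + 1) ((sez.length : Int) + 1) 1).foldl
          (fun opt b =>
            if PySem.List.pyGetD ((List.range (sez.length + 1)).map (pvPfx sez)) b 0 -
                 PySem.List.pyGetD ((List.range (sez.length + 1)).map (pvPfx sez)) a 0 > opt
            then PySem.List.pyGetD ((List.range (sez.length + 1)).map (pvPfx sez)) b 0 -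
                 PySem.List.pyGetD ((List.range (sez.length + 1)).map (pvPfx sez)) a 0
            else opt) opt) 0
    = (pvL sez).foldl (fun o x => max o x.2) 0 := by
  rw [pv_outer_shape sez (fun o x => if x.2 > o then x.2 else o) _ (fun a acc b => rfl) 0]
  have : (fun (o : Int) (x : (Int × Int) × Int) => if x.2 > o then x.2 else o)
      = (fun o x => max o x.2) := by
    funext o x
    exact pv_max_if o x.2
  rw [this]

lemma pv_B_eq (sez : List Int) :
    intervali_najvecjih_vsot_kvadratna_alt sez
      = (pvL sez).foldl (pvAddIf ((pvL sez).foldl (fun o x => max o x.2) 0)) [] := by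
  unfold intervali_najvecjih_vsot_kvadratna_alt
  dsimp only
  rw [pv_pre_eq, pv_B_opt]
  exact pv_outer_shape sez (pvAddIf ((pvL sez).foldl (fun o x => max o x.2) 0))
    (fun acc a b =>
      if PySem.List.pyGetD ((List.range (sez.length + 1)).map (pvPfx sez)) b 0 -
           PySem.List.pyGetD ((List.range (sez.length + 1)).map (pvPfx sez)) a 0 =
           (pvL sez).foldl (fun o x => max o x.2) 0
      then PySem.Set.add acc (a, b) else acc)
    (fun a acc b => rfl) PySem.Set.empty

-- ===== VERDICT (by name: the statement is the Claim_ definition above) =====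
theorem intervali_najvecjih_vsot_kvadratna_spec : Claim_equal_intervali_najvecjih_vsot_kvadratna := by
  intro sez _
  unfold Spec_intervali_najvecjih_vsot_kvadratna
  rw [pv_A_eq, pv_B_eq, pv_step_char (pvL sez) 0 _ [] rfl]
  split <;> rfl
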